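-- pv_equiv track=rewrite | github.com/jvSanches/PI-7 | Python_sender/MyCNCControl/prog_mananger.py | refine
-- ===== SOURCE A (Python) =====
-- def refine(prog):
--     ''' breaks a program into lists of lists of strings'''
--     refined_prog = []
--     for i in range(len(prog)):
--         line = []
--         module = ''
--         comment = False
--         for j in range(len(prog[i])):
--
--             if prog[i][j] == '(':
--                 comment = True
--             if comment and prog[i][j] == ')':
--                 comment = False
--
--             if not comment:
--                 if 65 <= ord(prog[i][j]) <= 90:
--                     if module != '':
--                         line.append(module)
--                     module = prog[i][j]
--                 elif 48 <=ord(prog[i][j]) <= 57 or prog[i][j] == '.' or prog[i][j] == '-':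
--                     module += prog[i][j]
--         if len(module)> 1:
--             line.append(module)
--         refined_prog.append(line)
--     return(refined_prog)
-- ===== SOURCE B (Python) =====
-- def _strip_comments(s):
--     '''remove '(' ... ')' regions; an unclosed '(' comments out the rest of the line'''
--     out = []
--     while True:
--         pre, sep, rest = s.partition('(')
--         out.append(pre)
--         if not sep:
--             break
--         _, sep2, s = rest.partition(')')
--         if not sep2:
--             break
--     return ''.join(out)
--
-- def refine(prog):
--     ''' breaks a program into lists of lists of strings'''
--     result = []
--     for raw in prog:
--         s = _strip_comments(raw)
--         s = ''.join(c for c in s if 'A' <= c <= 'Z' or '0' <= c <= '9' or c in '.-')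
--         toks = []
--         # a leading run of non-letter characters is its own token
--         k = len(s) - len(s.lstrip('0123456789.-'))
--         if k:
--             toks.append(s[:k])
--             s = s[k:]
--         # each remaining token: one capital letter plus the following run
--         while s:
--             body = s[1:]
--             k = len(body) - len(body.lstrip('0123456789.-'))
--             toks.append(s[:k + 1])
--             s = body[k:]
--         # only a final one-character token is dropped
--         if toks and len(toks[-1]) == 1:
--             toks.pop()
--         result.append(toks)
--     return result
-- ===== Notes on version B (the rewrite author's own statement) =====
-- stated objective: alternative
-- what changed: Replaced A's single stateful per-character loop (comment flag + running module buffer) with a three-stage pipeline: comment stripping via str.partition, a character filter, then a span-based tokenizer that slices one token per step and drops a final one-character token.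
import Mathlib
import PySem

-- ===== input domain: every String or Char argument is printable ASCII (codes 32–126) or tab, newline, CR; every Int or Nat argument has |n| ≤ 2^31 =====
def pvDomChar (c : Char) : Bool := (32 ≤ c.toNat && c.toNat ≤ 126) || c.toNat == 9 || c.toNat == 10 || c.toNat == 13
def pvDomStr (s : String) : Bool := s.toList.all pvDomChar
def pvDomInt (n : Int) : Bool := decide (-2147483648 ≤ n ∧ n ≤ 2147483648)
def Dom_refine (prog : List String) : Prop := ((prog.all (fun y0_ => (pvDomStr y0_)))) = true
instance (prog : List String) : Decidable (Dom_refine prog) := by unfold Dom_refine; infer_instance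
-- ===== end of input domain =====

-- B re-decomposes A's single stateful char loop as a strip/filter/tokenize pipeline; same values, similar cost ("alternative").

-- shared character classes (A tests them by ord-ranges inline; named here once)
def pvIsUp (c : Char) : Bool := 65 ≤ c.toNat && c.toNat ≤ 90
def pvIsLow (c : Char) : Bool := (48 ≤ c.toNat && c.toNat ≤ 57) || c = '.' || c = '-'

-- ===== PORT A =====
-- one step of A's inner loop; state = (line, module, comment)
def stepA (st : List (List Char) × List Char × Bool) (c : Char) : List (List Char) × List Char × Bool :=
  let line := st.1
  let module := st.2.1
  let comment := st.2.2
  let comment1 := if c = '(' then true else comment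
  let comment2 := if comment1 = true ∧ c = ')' then false else comment1
  if comment2 = false then
    if pvIsUp c then ((if module ≠ [] then line ++ [module] else line), [c], comment2)
    else if pvIsLow c then (line, module ++ [c], comment2)
    else (line, module, comment2)
  else (line, module, comment2)

def refineLineA (s : String) : List (List Char) :=
  let r := List.foldl stepA ([], [], false) s.toList
  if r.2.1.length > 1 then r.1 ++ [r.2.1] else r.1

def refine (prog : List String) : List (List String) :=
  prog.map (fun s => (refineLineA s).map (fun t => String.mk t))

-- ===== PORT B =====
-- B's _strip_comments: partition at '(' , then at ')' , loop (here: recursion on the remaining suffix)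
def stripC (s : List Char) : List Char :=
  match h1 : s.dropWhile (fun c => !(c = '(' : Bool)) with
  | [] => s.takeWhile (fun c => !(c = '(' : Bool))
  | _ :: tail =>
    match h2 : tail.dropWhile (fun c => !(c = ')' : Bool)) with
    | [] => s.takeWhile (fun c => !(c = '(' : Bool))
    | _ :: tail2 => s.takeWhile (fun c => !(c = '(' : Bool)) ++ stripC tail2
termination_by s.length
decreasing_by
  have q1 := List.length_dropWhile_le (p := fun c => !(c = '(' : Bool)) (l := s)
  have q2 := List.length_dropWhile_le (p := fun c => !(c = ')' : Bool)) (l := tail)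
  rw [h1] at q1
  rw [h2] at q2
  simp at q1 q2
  omega

def okC (c : Char) : Bool := pvIsUp c || pvIsLow c

-- B's while loop: one token (capital + following low run) per iteration
def tokloop (s : List Char) : List (List Char) :=
  match s with
  | [] => []
  | c :: body => (c :: body.takeWhile pvIsLow) :: tokloop (body.dropWhile pvIsLow)
termination_by s.length
decreasing_by
  have q := List.length_dropWhile_le (p := pvIsLow) (l := body)
  simp
  omega

-- B's tokenizer: leading low run (if any) is its own token, then the while loop
def tokensB (s : List Char) : List (List Char) :=
  let pre := s.takeWhile pvIsLow
  let rest := s.dropWhile pvIsLow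
  (if pre ≠ [] then [pre] else []) ++ tokloop rest

-- B's final 'if toks and len(toks[-1]) == 1: toks.pop()'
def popLast1 (toks : List (List Char)) : List (List Char) :=
  match toks.getLast? with
  | some t => if t.length = 1 then toks.dropLast else toks
  | none => toks

def refineLineB (s : String) : List (List Char) :=
  popLast1 (tokensB ((stripC s.toList).filter okC))

def refine_alt (prog : List String) : List (List String) :=
  prog.map (fun s => (refineLineB s).map (fun t => String.mk t))

-- ===== PRECONDITION & SPEC =====
def Spec_refine (prog : List String) (out : List (List String)) : Prop := out = refine_alt prog
instance (prog : List String) (out : List (List String)) : Decidable (Spec_refine prog out) := by unfold Spec_refine; infer_instance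

-- ===== CLAIM (what is proved, stated in full; the proofs are below) =====
def Claim_equal_refine : Prop := ∀ (prog : List String), Dom_refine prog → Spec_refine prog (refine prog)

-- ===== LEMMAS AND PROOFS =====

-- proof-only helpers ------------------------------------------------------

-- char-by-char version of comment stripping (bridge between stripC and A's flag)
mutual
def simpleStrip : List Char → List Char
  | [] => []
  | c :: r => if c = '(' then simpleSkip r else c :: simpleStrip r
def simpleSkip : List Char → List Char
  | [] => []
  | c :: r => if c = ')' then simpleStrip r else simpleSkip r
end

-- A's loop with the comment logic removed
def stepA0 (st : List (List Char) × List Char) (c : Char) : List (List Char) × List Char :=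
  if pvIsUp c then ((if st.2 ≠ [] then st.1 ++ [st.2] else st.1), [c])
  else if pvIsLow c then (st.1, st.2 ++ [c]) else st

def projA (st : List (List Char) × List Char × Bool) : List (List Char) × List Char := (st.1, st.2.1)

def finishA (st : List (List Char) × List Char) : List (List Char) :=
  if st.2.length > 1 then st.1 ++ [st.2] else st.1

-- recursive description of A's token stream from state (·, m)
def Ttok (m : List Char) : List Char → List (List Char)
  | [] => if m = [] then [] else [m]
  | c :: r => if pvIsUp c then (if m = [] then Ttok [c] r else m :: Ttok [c] r) else Ttok (m ++ [c]) r

theorem simpleStrip_decomp (s : List Char) :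
    simpleStrip s = s.takeWhile (fun c => !(c = '(' : Bool)) ++
      simpleSkip ((s.dropWhile (fun c => !(c = '(' : Bool))).tail) := by
  induction s with
  | nil => simp [simpleStrip, simpleSkip]
  | cons c r ih =>
    by_cases hc : c = '('
    · subst hc; simp [simpleStrip, List.takeWhile, List.dropWhile]
    · simp [simpleStrip, List.takeWhile, List.dropWhile, hc, ih]

theorem simpleSkip_decomp (s : List Char) :
    simpleSkip s = simpleStrip ((s.dropWhile (fun c => !(c = ')' : Bool))).tail) := by
  induction s with
  | nil => simp [simpleSkip, simpleStrip]
  | cons c r ih =>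
    by_cases hc : c = ')'
    · subst hc; simp [simpleSkip, List.dropWhile]
    · simp [simpleSkip, List.dropWhile, hc, ih]

theorem stripC_unclosed (s : List Char) (x : Char) (tail : List Char)
    (h1 : s.dropWhile (fun c => !(c = '(' : Bool)) = x :: tail)
    (h2 : tail.dropWhile (fun c => !(c = ')' : Bool)) = []) :
    stripC s = s.takeWhile (fun c => !(c = '(' : Bool)) := by
  rw [stripC, h1]
  split
  · rfl
  · next head tl hdw =>
    injection hdw with hxy htl
    subst htl
    split
    · rfl
    · next y t2 hd2 => rw [h2] at hd2; cases hd2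

theorem stripC_closed (s : List Char) (x : Char) (tail : List Char) (y : Char) (tail2 : List Char)
    (h1 : s.dropWhile (fun c => !(c = '(' : Bool)) = x :: tail)
    (h2 : tail.dropWhile (fun c => !(c = ')' : Bool)) = y :: tail2) :
    stripC s = s.takeWhile (fun c => !(c = '(' : Bool)) ++ stripC tail2 := by
  rw [stripC, h1]
  split
  · next hdw => cases hdw
  · next head tl hdw =>
    injection hdw with hxy htl
    subst htl
    split
    · next hd2 => rw [h2] at hd2; cases hd2
    · next y2 t2 hd2 =>
      rw [h2] at hd2
      injection hd2 with hy ht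
      subst ht
      rfl

theorem stripC_eq_simpleStrip (s : List Char) : stripC s = simpleStrip s := by
  induction s using stripC.induct with
  | case1 s h1 =>
    rw [stripC, h1, simpleStrip_decomp, h1]
    simp [simpleSkip]
  | case2 s x tail h1 h2 =>
    rw [stripC_unclosed s x tail h1 h2, simpleStrip_decomp, h1]
    simp only [List.tail_cons]
    rw [simpleSkip_decomp, h2]
    simp [simpleStrip]
  | case3 s x tail h1 y tail2 h2 ih =>
    rw [stripC_closed s x tail y tail2 h1 h2, simpleStrip_decomp, h1]
    simp only [List.tail_cons]
    rw [simpleSkip_decomp, h2]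
    simp [ih]

theorem comm_elim (s : List Char) : ∀ (line : List (List Char)) (m : List Char) (b : Bool),
    projA (List.foldl stepA (line, m, b) s) =
      List.foldl stepA0 (line, m) (if b then simpleSkip s else simpleStrip s) := by
  induction s with
  | nil => intro line m b; cases b <;> simp [projA, simpleSkip, simpleStrip]
  | cons c r ih =>
    intro line m b
    cases b with
    | false =>
      by_cases hc : c = '('
      · subst hc
        have hs : stepA (line, m, false) '(' = (line, m, true) := by simp [stepA, pvIsUp, pvIsLow]
        simp only [List.foldl, hs, simpleStrip, if_pos rfl, if_true]
        exact ih line m true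
      · have h2 : stepA (line, m, false) c =
            (let s0 := stepA0 (line, m) c; (s0.1, s0.2, false)) := by
          simp only [stepA, stepA0, hc]
          by_cases hu : pvIsUp c = true <;> by_cases hl : pvIsLow c = true <;>
            simp [hu, hl]
        simp only [List.foldl, h2, simpleStrip, if_neg hc, if_false]
        exact ih _ _ false
    | true =>
      by_cases hc : c = ')'
      · subst hc
        have hs : stepA (line, m, true) ')' = (line, m, false) := by
          simp [stepA, pvIsUp, pvIsLow]
        simp only [List.foldl, hs, simpleSkip, if_pos rfl, if_true]
        exact ih line m false
      · have hs : stepA (line, m, true) c = (line, m, true) := by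
          simp [stepA, hc]
        simp only [List.foldl, hs, simpleSkip, if_neg hc, if_false]
        exact ih line m true

theorem foldA0_filter (s : List Char) : ∀ st, List.foldl stepA0 st s = List.foldl stepA0 st (s.filter okC) := by
  induction s with
  | nil => intro st; simp
  | cons c r ih =>
    intro st
    by_cases h : okC c = true
    · simp only [List.filter_cons, h, if_true, List.foldl]
      exact ih _
    · have hu : pvIsUp c = false := by simp [okC] at h; exact h.1
      have hl : pvIsLow c = false := by simp [okC] at h; exact h.2
      have hs : stepA0 st c = st := by simp [stepA0, hu, hl]
      simp only [List.filter_cons, h, if_false, List.foldl, hs]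
      exact ih st

theorem Ttok_ne_nil (fs : List Char) : ∀ m : List Char, m ≠ [] → Ttok m fs ≠ [] := by
  induction fs with
  | nil => intro m hm; simp [Ttok, hm]
  | cons c r ih =>
    intro m hm
    by_cases hu : pvIsUp c = true
    · simp [Ttok, hu, hm]
    · simp only [Ttok, hu, if_false]
      exact ih (m ++ [c]) (by simp)

theorem popLast1_cons (x : List Char) (ts : List (List Char)) (h : ts ≠ []) :
    popLast1 (x :: ts) = x :: popLast1 ts := by
  cases ts with
  | nil => exact absurd rfl h
  | cons y ys =>
    simp only [popLast1, List.getLast?_cons_cons]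
    cases hg : (y :: ys).getLast? with
    | none => simp at hg
    | some t => by_cases h1 : t.length = 1 <;> simp [h1]

theorem core_fold (fs : List Char) (hok : ∀ c ∈ fs, okC c = true) :
    ∀ (line : List (List Char)) (m : List Char),
    finishA (List.foldl stepA0 (line, m) fs) = line ++ popLast1 (Ttok m fs) := by
  induction fs with
  | nil =>
    intro line m
    by_cases hm : m = []
    · subst hm; simp [finishA, Ttok, popLast1]
    · simp only [List.foldl, finishA, Ttok, if_neg hm]
      by_cases h1 : m.length = 1
      · have : ¬ m.length > 1 := by omega
        simp [popLast1, h1, this]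
      · have hlen : m.length > 1 := by
          have : m.length ≠ 0 := by simpa using hm
          omega
        simp [popLast1, h1, hlen]
  | cons c r ih =>
    intro line m
    have hokr : ∀ c ∈ r, okC c = true := fun x hx => hok x (List.mem_cons_of_mem _ hx)
    by_cases hu : pvIsUp c = true
    · have hs : stepA0 (line, m) c = ((if m ≠ [] then line ++ [m] else line), [c]) := by
        simp [stepA0, hu]
      by_cases hm : m = []
      · subst hm
        simp only [List.foldl, hs, if_neg (by simp : ¬ (([] : List Char) ≠ []))]
        rw [ih hokr line [c]]
        simp [Ttok, hu]
      · simp only [List.foldl, hs, if_pos hm]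
        rw [ih hokr (line ++ [m]) [c]]
        have hne : Ttok [c] r ≠ [] := Ttok_ne_nil r [c] (by simp)
        simp only [Ttok, hu, if_true, if_neg hm]
        rw [popLast1_cons m _ hne]
        simp
    · have hl : pvIsLow c = true := by
        have := hok c (List.mem_cons_self ..)
        simp [okC, hu] at this ⊢
        simpa using this
      have hs : stepA0 (line, m) c = (line, m ++ [c]) := by simp [stepA0, hu, hl]
      simp only [List.foldl, hs, Ttok, hu, if_false]
      exact ih hokr line (m ++ [c])

theorem up_not_low (c : Char) (h : pvIsUp c = true) : pvIsLow c = false := by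
  have h' : 65 ≤ c.toNat ∧ c.toNat ≤ 90 := by simpa [pvIsUp] using h
  have hdot : ¬ c = '.' := by rintro rfl; revert h; decide
  have hdash : ¬ c = '-' := by rintro rfl; revert h; decide
  simp [pvIsLow, hdot, hdash]
  omega

theorem Ttok_cons (fs : List Char) (hok : ∀ c ∈ fs, okC c = true) :
    ∀ m : List Char, m ≠ [] →
    Ttok m fs = (m ++ fs.takeWhile pvIsLow) :: tokloop (fs.dropWhile pvIsLow) := by
  induction fs with
  | nil => intro m hm; simp [Ttok, hm, tokloop]
  | cons c r ih =>
    intro m hm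
    have hokr : ∀ c ∈ r, okC c = true := fun x hx => hok x (List.mem_cons_of_mem _ hx)
    by_cases hu : pvIsUp c = true
    · have hl := up_not_low c hu
      have ht : tokloop (c :: r) = (c :: r.takeWhile pvIsLow) :: tokloop (r.dropWhile pvIsLow) := by
        rw [tokloop]
      simp only [Ttok, hu, if_true, if_neg hm]
      rw [ih hokr [c] (by simp)]
      simp [List.takeWhile, List.dropWhile, hl, ht]
    · have hl : pvIsLow c = true := by
        have := hok c (List.mem_cons_self ..)
        simp [okC, hu] at this ⊢
        simpa using this
      simp only [Ttok, hu, if_false]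
      rw [ih hokr (m ++ [c]) (by simp)]
      simp [List.takeWhile, List.dropWhile, hl]

theorem Ttok_nil (fs : List Char) (hok : ∀ c ∈ fs, okC c = true) :
    Ttok [] fs = tokensB fs := by
  cases fs with
  | nil => simp [Ttok, tokensB, tokloop]
  | cons c r =>
    have hokr : ∀ x ∈ r, okC x = true := fun x hx => hok x (List.mem_cons_of_mem _ hx)
    have hT := Ttok_cons r hokr [c] (by simp)
    by_cases hu : pvIsUp c = true
    · have hl := up_not_low c hu
      have ht : tokloop (c :: r) = (c :: r.takeWhile pvIsLow) :: tokloop (r.dropWhile pvIsLow) := by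
        rw [tokloop]
      simp [Ttok, hu, hT, tokensB, List.takeWhile, List.dropWhile, hl, ht]
    · have hl : pvIsLow c = true := by
        have := hok c (List.mem_cons_self ..)
        simp [okC, hu] at this ⊢
        simpa using this
      simp [Ttok, hu, hT, tokensB, List.takeWhile, List.dropWhile, hl]

theorem line_eq (s : String) : refineLineA s = refineLineB s := by
  have hok : ∀ c ∈ (simpleStrip s.toList).filter okC, okC c = true := by
    intro c hc; exact List.of_mem_filter hc
  have h1 : refineLineA s = finishA (projA (List.foldl stepA ([], [], false) s.toList)) := by
    simp [refineLineA, finishA, projA]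
  rw [h1, comm_elim]
  simp only [if_false, Bool.false_eq_true]
  rw [foldA0_filter]
  rw [core_fold _ hok [] []]
  rw [Ttok_nil _ hok]
  simp [refineLineB, stripC_eq_simpleStrip]

theorem refine_spec : Claim_equal_refine := by
  intro prog _
  unfold Spec_refine refine refine_alt
  exact List.map_congr_left (fun s _ => by rw [line_eq])
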